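-- pv_equiv track=rewrite | github.com/hjwwjhexe/ipl-kubsu | laba1/task1.py | count_odd_digits_gt_3
-- ===== SOURCE A (Python) =====
-- def count_odd_digits_gt_3(num):
--     count = 0
--     for digit in str(num):
--         if digit.isdigit():
--             d = int(digit)
--             if d % 2 == 1 and d > 3:
--                 count += 1
--     return count
-- ===== SOURCE B (Python) =====
-- def count_odd_digits_gt_3(num):
--     s = str(num)
--     return s.count('5') + s.count('7') + s.count('9')
-- ===== Notes on version B (the rewrite author's own statement) =====
-- stated objective: idiomatic
-- what changed: Replaced the per-character parse-and-test loop (isdigit, int(), parity and magnitude tests) by three targeted substring counts: the qualifying digits are exactly '5','7','9', so the result is s.count('5')+s.count('7')+s.count('9') over s=str(num).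
import Mathlib
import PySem

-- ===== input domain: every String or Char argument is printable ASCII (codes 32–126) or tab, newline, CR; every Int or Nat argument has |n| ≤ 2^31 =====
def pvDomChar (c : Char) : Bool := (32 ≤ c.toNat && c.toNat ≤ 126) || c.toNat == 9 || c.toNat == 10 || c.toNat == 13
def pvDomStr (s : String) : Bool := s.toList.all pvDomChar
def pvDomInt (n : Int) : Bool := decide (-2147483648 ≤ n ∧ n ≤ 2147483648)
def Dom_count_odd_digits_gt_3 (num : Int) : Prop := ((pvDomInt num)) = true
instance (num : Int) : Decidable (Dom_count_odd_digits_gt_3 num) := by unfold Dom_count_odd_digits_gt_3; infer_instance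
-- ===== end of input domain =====

-- B replaces A's per-character isdigit/int()/parity/magnitude loop by three substring counts
-- of the only qualifying digits '5','7','9' over str(num) (objective: idiomatic).


-- ===== PORT A =====
-- for digit in str(num): if digit.isdigit(): d = int(digit); if d % 2 == 1 and d > 3: count += 1
-- int(digit) via PySem.Int.ofChars?; the none branch is unreachable under isdigit and leaves count unchanged
def count_odd_digits_gt_3 (num : Int) : Int :=
  (PySem.Int.toChars num).foldl
    (fun count digit =>
      if PySem.Chars.isdigit digit then
        match PySem.Int.ofChars? [digit] with
        | some d => if PySem.Int.mod d 2 = 1 ∧ d > 3 then count + 1 else count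
        | none => count
      else count) 0

-- ===== PORT B =====
-- s = str(num); return s.count('5') + s.count('7') + s.count('9')
def count_odd_digits_gt_3_alt (num : Int) : Int :=
  let s := PySem.Int.toStr num
  (PySem.Str.count s "5" : Int) + (PySem.Str.count s "7" : Int) + (PySem.Str.count s "9" : Int)

-- ===== PRECONDITION & SPEC =====
def Spec_count_odd_digits_gt_3 (num : Int) (out : Int) : Prop := out = count_odd_digits_gt_3_alt num
instance (num : Int) (out : Int) : Decidable (Spec_count_odd_digits_gt_3 num out) := by unfold Spec_count_odd_digits_gt_3; infer_instance

-- ===== CLAIM (what is proved, stated in full; the proofs are below) =====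
def Claim_equal_count_odd_digits_gt_3 : Prop := ∀ (num : Int), Dom_count_odd_digits_gt_3 num → Spec_count_odd_digits_gt_3 num (count_odd_digits_gt_3 num)

-- ===== LEMMAS AND PROOFS =====

-- any char with isdigit = true is one of the ten ASCII digits
theorem pv_digit_enum (c : Char) (h : PySem.Chars.isdigit c = true) :
    c = '0' ∨ c = '1' ∨ c = '2' ∨ c = '3' ∨ c = '4' ∨ c = '5' ∨ c = '6' ∨ c = '7' ∨ c = '8' ∨ c = '9' := by
  simp [PySem.Chars.isdigit, Char.le_def] at h
  obtain ⟨h1, h2⟩ := h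
  have hA : 48 ≤ c.toNat := h1
  have hB : c.toNat ≤ 57 := h2
  have hg : c = Char.ofNat c.toNat := (Char.ofNat_toNat c).symm
  have h3 : c.toNat = 48 ∨ c.toNat = 49 ∨ c.toNat = 50 ∨ c.toNat = 51 ∨ c.toNat = 52 ∨
      c.toNat = 53 ∨ c.toNat = 54 ∨ c.toNat = 55 ∨ c.toNat = 56 ∨ c.toNat = 57 := by omega
  rcases h3 with h3 | h3 | h3 | h3 | h3 | h3 | h3 | h3 | h3 | h3 <;> rw [h3] at hg <;> subst hg <;> decide

-- A's loop body, written out; pv_step_shift splits off the accumulator, pv_inc evaluates the increment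
def pvStepA (count : Int) (digit : Char) : Int :=
  if PySem.Chars.isdigit digit then
    match PySem.Int.ofChars? [digit] with
    | some d => if PySem.Int.mod d 2 = 1 ∧ d > 3 then count + 1 else count
    | none => count
  else count

theorem pv_step_shift (acc : Int) (c : Char) : pvStepA acc c = acc + pvStepA 0 c := by
  unfold pvStepA
  rcases hm : PySem.Int.ofChars? [c] with _ | d <;>
    by_cases hd : PySem.Chars.isdigit c = true <;> simp [hm, hd] <;> split_ifs <;> ring

theorem pv_inc (c : Char) :
    pvStepA 0 c = (if c = '5' then 1 else 0) + (if c = '7' then 1 else 0) + (if c = '9' then 1 else 0) := by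
  by_cases h : PySem.Chars.isdigit c = true
  · rcases pv_digit_enum c h with h' | h' | h' | h' | h' | h' | h' | h' | h' | h' <;> subst h' <;> decide
  · have h5 : c ≠ '5' := by rintro rfl; exact h (by decide)
    have h7 : c ≠ '7' := by rintro rfl; exact h (by decide)
    have h9 : c ≠ '9' := by rintro rfl; exact h (by decide)
    simp [pvStepA, h, h5, h7, h9]

-- one step of A's loop adds 1 exactly for '5', '7', '9'
theorem pv_stepA (acc : Int) (c : Char) :
    pvStepA acc c
    = acc + (if c = '5' then 1 else 0) + (if c = '7' then 1 else 0) + (if c = '9' then 1 else 0) := by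
  rw [pv_step_shift, pv_inc]; ring

-- Chars.count with a single-character needle is List.count
theorem pv_count_go_single (c : Char) :
    ∀ (fuel : Nat) (l : List Char) (acc : Nat), l.length ≤ fuel →
      PySem.Chars.count.go [c] fuel l acc = acc + l.count c := by
  intro fuel
  induction fuel with
  | zero =>
      intro l acc h
      have : l = [] := List.length_eq_zero_iff.mp (Nat.le_zero.mp h)
      subst this; simp [PySem.Chars.count.go]
  | succ n ih =>
      intro l acc h
      cases l with
      | nil => simp [PySem.Chars.count.go]
      | cons x t =>
          have hlen : t.length ≤ n := by simp at h; omega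
          simp only [PySem.Chars.count.go]
          by_cases hx : c = x
          · subst hx
            rw [if_pos (by simp [List.isPrefixOf])]
            simp only [List.length_cons, List.length_nil, List.drop_succ_cons, List.drop_zero]
            rw [ih t (acc + 1) hlen, List.count_cons]
            simp; omega
          · rw [if_neg (by simp [List.isPrefixOf]; exact fun hcx => hx hcx)]
            rw [ih t acc hlen, List.count_cons]
            simp [Ne.symm hx]

theorem pv_count_single (l : List Char) (c : Char) :
    PySem.Chars.count l [c] = l.count c := by
  simpa [PySem.Chars.count] using pv_count_go_single c l.length l 0 le_rfl

-- the whole loop equals the three counts, for any character list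
theorem pv_fold_eq (l : List Char) : ∀ (acc : Int),
    l.foldl pvStepA acc
    = acc + (l.count '5' : Int) + (l.count '7' : Int) + (l.count '9' : Int) := by
  induction l with
  | nil => intro acc; simp
  | cons x t ih =>
      intro acc
      simp only [List.foldl_cons]
      rw [ih, pv_stepA acc x]
      simp [List.count_cons]
      by_cases h5 : x = '5' <;> by_cases h7 : x = '7' <;> by_cases h9 : x = '9' <;>
        simp_all <;> push_cast <;> ring

-- ===== VERDICT (by name: the statement is the Claim_ definition above) =====
theorem count_odd_digits_gt_3_spec : Claim_equal_count_odd_digits_gt_3 := by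
  intro num _
  unfold Spec_count_odd_digits_gt_3 count_odd_digits_gt_3 count_odd_digits_gt_3_alt
  rw [show (fun count digit =>
      if PySem.Chars.isdigit digit then
        match PySem.Int.ofChars? [digit] with
        | some d => if PySem.Int.mod d 2 = 1 ∧ d > 3 then count + 1 else count
        | none => count
      else count) = pvStepA from rfl]
  rw [pv_fold_eq]
  simp only [PySem.Str.count]
  rw [PySem.Int.toList_toStr]
  rw [show ("5" : String).toList = ['5'] from rfl, show ("7" : String).toList = ['7'] from rfl,
     show ("9" : String).toList = ['9'] from rfl]
  rw [pv_count_single, pv_count_single, pv_count_single]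
  ring
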